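-- pv_equiv track=rewrite | github.com/Pacten15/Projeto-FP | Projeto 1 Jogo do galo.py | eh_posicao
-- ===== SOURCE A (Python) =====
-- def eh_posicao(n):#le um numero digitado pe
--     '''Verificar se o digitado e uma posicao do tabuleiro'''
--     num_disp = (1, 2, 3, 4, 5, 6, 7 ,8 ,9) # num de posicoes no tabuleiro
--     if type(n) != int:   # verificacao que o n e uma possicao
--         return False
--     else:
--         for i in range(len(num_disp)):#define para i todos os el do tuplo
--             if n == num_disp[i]: # verifica se n pertence ao tuplo
--                 return True
--         else:
--             return False
-- ===== SOURCE B (Python) =====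
-- def eh_posicao(n):
--     '''Verificar se o digitado e uma posicao do tabuleiro'''
--     return type(n) == int and 1 <= n <= 9
-- ===== Notes on version B (the rewrite author's own statement) =====
-- stated objective: simpler
-- what changed: Replaces the tuple table and linear membership scan with a single closed-form chained range comparison 1 <= n <= 9 (type(n) == int kept so booleans are rejected exactly as A does).
import Mathlib
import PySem

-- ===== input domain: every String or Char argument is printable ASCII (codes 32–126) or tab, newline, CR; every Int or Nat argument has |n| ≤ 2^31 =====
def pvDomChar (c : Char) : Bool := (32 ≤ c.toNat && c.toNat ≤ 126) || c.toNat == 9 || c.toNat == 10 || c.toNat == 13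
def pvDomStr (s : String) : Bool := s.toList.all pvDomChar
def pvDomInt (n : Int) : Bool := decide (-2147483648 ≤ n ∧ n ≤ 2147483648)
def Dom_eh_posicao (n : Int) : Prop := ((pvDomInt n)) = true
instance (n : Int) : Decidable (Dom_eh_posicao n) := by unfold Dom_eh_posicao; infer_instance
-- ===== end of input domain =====

-- B replaces A's tuple table and index-by-index membership scan with one closed-form
-- chained range comparison (objective: simpler). On Int the `type(n) == int` guard is always true.

-- ===== PORT A =====
-- A scans indices i = 0..8 of the tuple, returning True on the first match, False after the loop.
def eh_posicao_loop (n : Int) (num_disp : List Int) : List Nat → Bool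
  | [] => false
  | i :: is =>
      if n == num_disp.getD i 0 then true else eh_posicao_loop n num_disp is

def eh_posicao (n : Int) : Bool :=
  let num_disp : List Int := [1, 2, 3, 4, 5, 6, 7, 8, 9]
  eh_posicao_loop n num_disp (List.range num_disp.length)

-- ===== PORT B =====
def eh_posicao_alt (n : Int) : Bool :=
  decide (1 ≤ n ∧ n ≤ 9)

-- ===== PRECONDITION & SPEC =====
def Spec_eh_posicao (n : Int) (out : Bool) : Prop := out = eh_posicao_alt n
instance (n : Int) (out : Bool) : Decidable (Spec_eh_posicao n out) := by unfold Spec_eh_posicao; infer_instance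

-- ===== CLAIM (what is proved, stated in full; the proofs are below) =====
def Claim_equal_eh_posicao : Prop := ∀ (n : Int), Dom_eh_posicao n → Spec_eh_posicao n (eh_posicao n)

-- ===== LEMMAS AND PROOFS =====
theorem eh_posicao_eq (n : Int) : eh_posicao n = eh_posicao_alt n := by
  unfold eh_posicao eh_posicao_alt
  simp only [List.range, List.range.loop, List.length_cons, List.length_nil]
  simp only [eh_posicao_loop, List.getD]
  by_cases h1 : n = 1 <;> by_cases h2 : n = 2 <;> by_cases h3 : n = 3 <;>
    by_cases h4 : n = 4 <;> by_cases h5 : n = 5 <;> by_cases h6 : n = 6 <;>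
    by_cases h7 : n = 7 <;> by_cases h8 : n = 8 <;> by_cases h9 : n = 9 <;>
    simp_all <;> omega

-- ===== VERDICT (by name: the statement is the Claim_ definition above) =====
theorem eh_posicao_spec : Claim_equal_eh_posicao := by
  intro n _
  exact eh_posicao_eq n
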